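-- pv_equiv track=rewrite | github.com/kyjimmy/Bioinformatics | dna_seq.py | MedianScore
-- ===== SOURCE A (Python) =====
-- from collections import Counter
--
-- def MedianScore(seqs):
--     # Calculates the Median score, i.e. the degree of mismatches
--     seq_len = len(seqs)
--     score = 0
--     for i in range(len(seqs[0])):
--         nucs = list(map(lambda x: x[i], seqs))
--         counter = Counter(nucs)
--         score += seq_len - max(counter.values())
--     return score
-- ===== SOURCE B (Python) =====
-- def MedianScore(seqs):
--     # Sort-then-scan: per column, sort the characters and take the longest run
--     # of equal characters (= the most common count), subtracting from n*L.
--     # No Counter / hash table anywhere.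
--     n = len(seqs)
--     L = len(seqs[0])
--     total = n * L
--     for i in range(L):
--         col = sorted(s[i] for s in seqs)
--         best, run = 1, 1
--         for a, b in zip(col, col[1:]):
--             run = run + 1 if a == b else 1
--             if run > best:
--                 best = run
--         total -= best
--     return total
-- ===== Notes on version B (the rewrite author's own statement) =====
-- stated objective: alternative
-- what changed: Replaces the per-column hash Counter and max-of-values with sort-then-scan: each column is sorted and the most common count is read off as the longest run of equal adjacent characters, with the result accumulated by subtracting each best run from n*L.
import Mathlib
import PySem

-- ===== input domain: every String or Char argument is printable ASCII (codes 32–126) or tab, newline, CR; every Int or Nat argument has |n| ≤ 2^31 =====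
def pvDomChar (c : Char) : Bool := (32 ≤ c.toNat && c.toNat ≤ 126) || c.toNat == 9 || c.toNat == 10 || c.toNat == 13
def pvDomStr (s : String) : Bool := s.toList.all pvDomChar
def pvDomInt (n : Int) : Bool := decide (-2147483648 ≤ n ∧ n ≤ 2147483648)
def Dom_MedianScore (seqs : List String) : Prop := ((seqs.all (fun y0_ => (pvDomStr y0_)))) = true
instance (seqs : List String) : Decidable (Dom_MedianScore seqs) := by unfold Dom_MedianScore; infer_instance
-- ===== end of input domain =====

-- B replaces the per-column hash Counter by sort-then-scan (longest run of equal adjacent characters), subtracting from n*L (alternative algorithm, no speed claim).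

-- ===== PORT A =====
-- Column-major: for each i, build the column, Counter it, add n - max count.
def MedianScore (seqs : List String) : Int :=
  let seq_len : Int := seqs.length
  let s0 := (PySem.List.pyGet? seqs 0).getD ""           -- seqs[0]; Pre_ excludes seqs = []
  (List.range s0.toList.length).foldl (fun (score : Int) (i : Nat) =>
    let nucs := seqs.map (fun x => (PySem.Str.pyGet? x (i : Int)).getD ' ')  -- x[i]; Pre_ keeps it in range
    let counter := PySem.Dict.counter nucs
    score + (seq_len - (PySem.List.max? counter.values (fun v => v)).getD 0)) 0

-- ===== PORT B =====
-- inner loop of Source B: longest run of equal adjacent characters, over zip(col, col[1:])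
def MS_bestRun (col : List Char) : Int :=
  ((col.zip col.tail).foldl (fun (st : Int × Int) ab =>
      let run := if ab.1 == ab.2 then st.2 + 1 else 1
      (if run > st.1 then run else st.1, run)) (1, 1)).1

def MedianScore_alt (seqs : List String) : Int :=
  let n : Int := seqs.length
  let L := ((PySem.List.pyGet? seqs 0).getD "").toList.length    -- len(seqs[0]); Pre_ excludes seqs = []
  (List.range L).foldl (fun (total : Int) (i : Nat) =>
    let col := PySem.List.sorted (seqs.map (fun s => (PySem.Str.pyGet? s (i : Int)).getD ' ')) (fun c => c) false
    total - MS_bestRun col) (n * L)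

-- ===== PRECONDITION & SPEC =====
-- Pre_ excludes exactly the inputs on which the Python A raises IndexError:
-- empty seqs (seqs[0]) and rows shorter than seqs[0] (x[i] out of range).
def Pre_MedianScore (seqs : List String) : Prop :=
  seqs ≠ [] ∧ ∀ s ∈ seqs, (seqs.headI).toList.length ≤ s.toList.length
instance (seqs : List String) : Decidable (Pre_MedianScore seqs) := by unfold Pre_MedianScore; infer_instance

def pvWitness_MedianScore : List String := ["ACG", "ATG", "CCGT"]

def Spec_MedianScore (seqs : List String) (out : Int) : Prop := out = MedianScore_alt seqs
instance (seqs : List String) (out : Int) : Decidable (Spec_MedianScore seqs out) := by unfold Spec_MedianScore; infer_instance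

-- ===== CLAIM (what is proved, stated in full; the proofs are below) =====
def Claim_equal_MedianScore : Prop := ∀ (seqs : List String), Dom_MedianScore seqs → Pre_MedianScore seqs → Spec_MedianScore seqs (MedianScore seqs)

-- ===== LEMMAS AND PROOFS =====

-- sum of (n - f i) over a list, split into length*n and the negated sum
theorem MS_sum_sub (l : List Nat) (n : Int) (f : Nat → Int) :
    (l.map (fun i => n - f i)).sum = (l.length : Int) * n + (l.map (fun i => -(f i))).sum := by
  induction l with
  | nil => simp
  | cons a t ih => simp [ih]; ring

-- max over the elements of l of l.count (the "most common count"); 0 on []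
def MS_mc (l : List Char) : Nat := l.foldl (fun acc c => max acc (l.count c)) 0

-- generic upper bound for a running max of a projection
theorem MS_foldl_max_le {β : Type} (xs : List β) (f : β → Nat) (init m : Nat)
    (h0 : init ≤ m) (h : ∀ x ∈ xs, f x ≤ m) :
    xs.foldl (fun acc y => max acc (f y)) init ≤ m := by
  induction xs generalizing init with
  | nil => exact h0
  | cons x t ih =>
      exact ih _ (max_le h0 (h x (by simp))) (fun y hy => h y (by simp [hy]))

theorem MS_le_mc {l : List Char} {c : Char} (hc : c ∈ l) : l.count c ≤ MS_mc l :=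
  (PySem.List.le_foldl_max_nat l (fun c => l.count c) 0).2 c hc

theorem MS_mc_le {l : List Char} {m : Nat} (h : ∀ c ∈ l, l.count c ≤ m) : MS_mc l ≤ m :=
  MS_foldl_max_le l _ 0 m (Nat.zero_le m) h

-- mc only depends on the multiset of elements
theorem MS_mc_perm {l₁ l₂ : List Char} (h : l₁.Perm l₂) : MS_mc l₁ = MS_mc l₂ := by
  apply Nat.le_antisymm
  · exact MS_mc_le (fun c hc => by rw [h.count_eq]; exact MS_le_mc (h.mem_iff.mp hc))
  · exact MS_mc_le (fun c hc => by rw [← h.count_eq]; exact MS_le_mc (h.mem_iff.mpr hc))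

-- appending one element to the scanned prefix
theorem MS_mc_append_singleton (q : List Char) (b : Char) :
    MS_mc (q ++ [b]) = max (MS_mc q) ((q ++ [b]).count b) := by
  apply Nat.le_antisymm
  · apply MS_mc_le
    intro c hc
    rcases List.mem_append.mp hc with hcq | hcb
    · by_cases hcb' : c = b
      · subst hcb'; exact le_max_right _ _
      · have : (q ++ [b]).count c = q.count c := by
          have h0 : List.count c [b] = 0 := List.count_eq_zero.mpr (by simp [hcb'])
          rw [List.count_append, h0, Nat.add_zero]
        rw [this]
        exact le_trans (MS_le_mc hcq) (le_max_left _ _)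
    · have : c = b := by simpa using hcb
      subst this; exact le_max_right _ _
  · apply max_le
    · apply MS_mc_le
      intro c hc
      have h1 : q.count c ≤ (q ++ [b]).count c := by simp [List.count_append]
      exact le_trans h1 (MS_le_mc (List.mem_append.mpr (Or.inl hc)))
    · exact MS_le_mc (List.mem_append.mpr (Or.inr (by simp)))

-- the B-side scan invariant: over a sorted list, the running (best, run) pair
-- tracks (most common count of the prefix, count of the last character)
theorem MS_scan_inv (l : List Char) : ∀ (p : List Char) (x : Char),
    (p ++ x :: l).Pairwise (· ≤ ·) →
    (((x :: l).zip l).foldl (fun (st : Int × Int) ab =>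
        let run := if ab.1 == ab.2 then st.2 + 1 else 1
        (if run > st.1 then run else st.1, run))
      ((MS_mc (p ++ [x]) : Int), ((p ++ [x]).count x : Int))).1
    = (MS_mc (p ++ x :: l) : Int) := by
  induction l with
  | nil => intro p x _; simp
  | cons b l ih =>
      intro p x hpair
      have hxb : x ≤ b := by
        have := (List.pairwise_append.mp hpair).2.1
        exact (List.pairwise_cons.mp this).1 b (by simp)
      have hassoc : (p ++ [x]) ++ b :: l = p ++ x :: b :: l := by simp
      by_cases hxeqb : x = b
      · -- equal: run increments
        subst hxeqb
        have h2 := ih (p ++ [x]) x (by simpa using hpair)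
        rw [hassoc] at h2
        have hrun : ((p ++ [x]).count x : Int) + 1 = (((p ++ [x]) ++ [x]).count x : Int) := by
          simp [List.count_append]
          omega
        have hbest : (max (MS_mc (p ++ [x])) (((p ++ [x]) ++ [x]).count x) : Nat)
            = MS_mc ((p ++ [x]) ++ [x]) := (MS_mc_append_singleton (p ++ [x]) x).symm
        simp only [List.zip_cons_cons, List.foldl_cons, beq_self_eq_true, if_true]
        rw [hrun]
        have hif : (if (((p ++ [x]) ++ [x]).count x : Int) > (MS_mc (p ++ [x]) : Int)
              then ((((p ++ [x]) ++ [x]).count x : Int))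
              else (MS_mc (p ++ [x]) : Int)) = (MS_mc ((p ++ [x]) ++ [x]) : Int) := by
          rw [← hbest]
          split_ifs with hgt
          · omega
          · omega
        rw [hif]
        exact h2
      · -- strictly larger: b is new, run resets to 1
        have hbnotin : b ∉ p ++ [x] := by
          intro hb
          have hple : ∀ c ∈ p, c ≤ x := by
            intro c hc
            have := (List.pairwise_append.mp hpair).2.2
            exact this c hc x (by simp)
          rcases List.mem_append.mp hb with hbp | hbx
          · exact hxeqb (le_antisymm hxb (hple b hbp))
          · exact hxeqb ((by simpa using hbx) : b = x).symm
        have hq0 : (p ++ [x]).count b = 0 := List.count_eq_zero.mpr hbnotin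
        have hcount1 : (((p ++ [x]) ++ [b]).count b : Int) = 1 := by
          rw [List.count_append, hq0]; simp
        have hbest : MS_mc ((p ++ [x]) ++ [b]) = MS_mc (p ++ [x]) := by
          rw [MS_mc_append_singleton]
          have h1 : ((p ++ [x]) ++ [b]).count b = 1 := by
            rw [List.count_append, hq0]; simp
          rw [h1]
          have hx1 : 1 ≤ (p ++ [x]).count x := by simp [List.count_append]
          have := MS_le_mc (l := p ++ [x]) (c := x) (by simp)
          omega
        have h2 := ih (p ++ [x]) b (by simpa using hpair)
        rw [hcount1, hbest, hassoc] at h2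
        have hbeq : (x == b) = false := by simp [hxeqb]
        simp only [List.zip_cons_cons, List.foldl_cons, hbeq, Bool.false_eq_true, if_false]
        have hmc1 : (1 : Int) ≤ (MS_mc (p ++ [x]) : Int) := by
          have hx1 : 1 ≤ (p ++ [x]).count x := by simp [List.count_append]
          have := MS_le_mc (l := p ++ [x]) (c := x) (by simp)
          omega
        have hif : (if (1 : Int) > (MS_mc (p ++ [x]) : Int)
              then (1 : Int) else (MS_mc (p ++ [x]) : Int)) = (MS_mc (p ++ [x]) : Int) := by
          omega
        rw [hif]
        exact h2

-- B's inner loop on a sorted nonempty column computes the most common count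
theorem MS_bestRun_sorted (col : List Char) (h : col ≠ []) :
    MS_bestRun (PySem.List.sorted col (fun c => c) false) = (MS_mc col : Int) := by
  have hperm := PySem.List.sorted_perm col (fun c => c) false
  have hpair : (PySem.List.sorted col (fun c => c) false).Pairwise (· ≤ ·) := by
    simpa using PySem.List.sorted_pairwise col (fun c => c)
  obtain ⟨x, l, hs⟩ : ∃ x l, PySem.List.sorted col (fun c => c) false = x :: l := by
    cases hsort : PySem.List.sorted col (fun c => c) false with
    | nil => exact absurd ((PySem.List.sorted_eq_nil_iff col (fun c => c) false).mp hsort) h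
    | cons x l => exact ⟨x, l, rfl⟩
  rw [hs] at hperm hpair ⊢
  have hinv := MS_scan_inv l [] x (by simpa using hpair)
  have : MS_bestRun (x :: l) = (MS_mc (x :: l) : Int) := by
    simpa [MS_bestRun, MS_mc] using hinv
  rw [this, MS_mc_perm hperm]

-- the values of Counter(xs)
theorem MS_counter_values (xs : List Char) :
    (PySem.Dict.counter xs).values = (PySem.Set.ofList xs).map (fun k => ((xs.count k : Nat) : Int)) := by
  have h := PySem.Dict.items_counter xs
  simp [PySem.Dict.values] at *
  simpa [Function.comp] using congrArg (List.map Prod.snd) h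

-- A's max of Counter values is the most common count
theorem MS_maxv_eq (xs : List Char) (h : xs ≠ []) :
    (PySem.List.max? (PySem.Dict.counter xs).values (fun v => v)).getD 0 = (MS_mc xs : Int) := by
  rw [MS_counter_values]
  have hne : (PySem.Set.ofList xs).map (fun k => ((xs.count k : Nat) : Int)) ≠ [] := by
    simp only [ne_eq, List.map_eq_nil_iff]
    intro hnil
    rcases List.exists_mem_of_ne_nil xs h with ⟨x, hx⟩
    have : x ∈ PySem.Set.ofList xs := (PySem.Set.mem_ofList xs x).mpr hx
    simp [hnil] at this
  cases hm : PySem.List.max? ((PySem.Set.ofList xs).map (fun k => ((xs.count k : Nat) : Int))) (fun v => v) with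
  | none => exact absurd ((PySem.List.max?_eq_none_iff _ _).mp hm) hne
  | some m =>
      have hmem := PySem.List.max?_mem hm
      have hmax := PySem.List.max?_isMax hm
      rcases List.mem_map.mp hmem with ⟨k, hk, hkm⟩
      have hkxs : k ∈ xs := (PySem.Set.mem_ofList xs k).mp hk
      simp only [Option.getD_some]
      apply le_antisymm
      · rw [← hkm]
        exact_mod_cast MS_le_mc hkxs
      · have hub : ∀ c ∈ xs, xs.count c ≤ (xs.count k : Nat) + (m - xs.count k).toNat := by
          intro c hc
          have hcm := hmax ((xs.count c : Int)) (List.mem_map.mpr ⟨c, (PySem.Set.mem_ofList xs c).mpr hc, rfl⟩)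
          omega
        have := MS_mc_le hub
        have hmk : (xs.count k : Int) = m := hkm
        omega

theorem MedianScore_spec : Claim_equal_MedianScore := by
  intro seqs _ hpre
  obtain ⟨hne, _⟩ := hpre
  show MedianScore seqs = MedianScore_alt seqs
  unfold MedianScore MedianScore_alt
  have hcolne : ∀ i : Nat, seqs.map (fun s => (PySem.Str.pyGet? s (i : Int)).getD ' ') ≠ [] := by
    intro i; simpa using hne
  -- identify the per-column values on both sides
  have hstep : ∀ i : Nat,
      MS_bestRun (PySem.List.sorted (seqs.map (fun s => (PySem.Str.pyGet? s (i : Int)).getD ' ')) (fun c => c) false)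
      = (PySem.List.max? (PySem.Dict.counter (seqs.map (fun x => (PySem.Str.pyGet? x (i : Int)).getD ' '))).values (fun v => v)).getD 0 := by
    intro i
    rw [MS_bestRun_sorted _ (hcolne i), MS_maxv_eq _ (hcolne i)]
  set n : Int := (seqs.length : Int) with hn
  set L : Nat := ((PySem.List.pyGet? seqs 0).getD "").toList.length with hL
  set f : Nat → Int := fun i => (PySem.List.max? (PySem.Dict.counter (seqs.map (fun x => (PySem.Str.pyGet? x (i : Int)).getD ' '))).values (fun v => v)).getD 0 with hf
  have hA : (List.range L).foldl (fun (score : Int) (i : Nat) => score + (n - f i)) 0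
      = 0 + ((List.range L).map (fun i => n - f i)).sum := PySem.List.foldl_add _ _ _
  have hB : (List.range L).foldl (fun (total : Int) (i : Nat) => total + (-(f i))) (n * L)
      = n * L + ((List.range L).map (fun i => -(f i))).sum := PySem.List.foldl_add _ _ _
  have hBeq : (List.range L).foldl (fun (total : Int) (i : Nat) =>
        total - MS_bestRun (PySem.List.sorted (seqs.map (fun s => (PySem.Str.pyGet? s (i : Int)).getD ' ')) (fun c => c) false)) (n * L)
      = (List.range L).foldl (fun (total : Int) (i : Nat) => total + (-(f i))) (n * L) := by
    apply PySem.List.foldl_congr_mem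
    intro acc i _
    rw [hstep i]
    ring
  have hsum : ((List.range L).map (fun i => n - f i)).sum
      = ((List.range L).length : Int) * n + ((List.range L).map (fun i => -(f i))).sum :=
    MS_sum_sub (List.range L) n f
  show (List.range L).foldl (fun (score : Int) (i : Nat) => score + (n - f i)) 0
      = (List.range L).foldl (fun (total : Int) (i : Nat) =>
        total - MS_bestRun (PySem.List.sorted (seqs.map (fun s => (PySem.Str.pyGet? s (i : Int)).getD ' ')) (fun c => c) false)) (n * L)
  rw [hA, hBeq, hB, hsum]
  simp [mul_comm]

-- ===== VERDICT (by name: the statement is the Claim_ definition above) =====
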